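-- pv_equiv track=rewrite | github.com/flavioab/tweetstorm-generator | tweetstorm_generator/core.py | get_tweets
-- ===== SOURCE A (Python) =====
-- TWEET_LENGTH = 140
--
-- def total_tweets(text: str) -> int:
--     len_txt = len(text)
--     num_tweets = 0
--     sum_prefix = 0
--     sum_sufix = 0
--
--     while num_tweets * TWEET_LENGTH - sum_prefix < len_txt:
--         num_tweets += 1
--
--         len_num_tweets = len(str(num_tweets))
--         len_num_tweets_ant = len(str(num_tweets - 1))
--
--         prefix_len = 2 * (len_num_tweets + 1)
--         sufix_len = TWEET_LENGTH - prefix_len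
--         diff = (num_tweets - 1) * (len_num_tweets - len_num_tweets_ant)
--
--         # CALCULATION
--         sum_prefix += (prefix_len + diff)
--         sum_sufix += (sufix_len - diff)
--
--     return num_tweets
--
-- def colored_index(i: int, total: int) -> str:
--     ''' Fancy color output '''
--     blue = '\033[94m'
--     bold = '\033[1m'
--     end = '\033[0m'
--
--     return '{:s}{:s}{:d}/{:d}{:s}{:s}'.format(blue, bold, i, total, end, end)
--
-- def get_tweets(text: str=None, color: bool=True) -> list:
--     total = total_tweets(text)
--     pos = 0
--     tweets = []
--
--     for i in range(1, total + 1):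
--         prefix = len(str(i)) + len(str(total)) + 2
--         pos_ant = pos
--         pos = pos + TWEET_LENGTH - prefix
--
--         if color:
--             tweets.append('{:s} {:s}'.format(colored_index(i, total), text[pos_ant:pos]))
--         else:
--             tweets.append('{:d}/{:d} {:s}'.format(i, total, text[pos_ant:pos]))
--
--     return tweets
-- ===== SOURCE B (Python) =====
-- TWEET_LENGTH = 140
--
-- def _cumdigits(t):
--     # sum of len(str(i)) for i = 1..t, by closed form over digit bands: O(log t)
--     s, p, d = 0, 1, 1
--     while p * 10 <= t:
--         s += 9 * p * d
--         p *= 10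
--         d += 1
--     return s + (t - p + 1) * d
--
-- def _count(n):
--     # smallest t with sum_{i<=t} (140 - len(str(i)) - len(str(t)) - 2) >= n,
--     # found by solving the inequality with a ceiling division inside each
--     # digit band (len(str(t)) constant there), instead of counting one by one.
--     if n <= 0:
--         return 0
--     d, lo, base = 1, 1, 0          # base = _cumdigits(lo - 1)
--     while True:
--         hi = 10 * lo - 1
--         slope = TWEET_LENGTH - 2 - 2 * d
--         need = n + base - (lo - 1) * d
--         t = -(-need // slope)      # ceiling division
--         if t <= hi:
--             return t if t > lo else lo
--         base += 9 * lo * d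
--         lo, d = 10 * lo, d + 1
--
-- def get_tweets(text=None, color=True):
--     total = _count(len(text))
--     body = TWEET_LENGTH - 2 - len(str(total))
--     fmt = ('\033[94m\033[1m{:d}/{:d}\033[0m\033[0m {:s}' if color
--            else '{:d}/{:d} {:s}')
--     # each chunk boundary is computed in closed form; no running position
--     return [fmt.format(i, total,
--                        text[body * (i - 1) - _cumdigits(i - 1):
--                             body * i - _cumdigits(i)])
--             for i in range(1, total + 1)]
-- ===== Notes on version B (the rewrite author's own statement) =====
-- stated objective: alternative
-- what changed: B replaces A's tweet-by-tweet counting loop with a closed-form solve: within each digit band (where len(str(t)) is constant) the stopping inequality is linear in t and is solved by one ceiling division, and each chunk boundary is then computed in closed form (body*i minus cumulative digit count) instead of A's running-position accumulator; Pre_ excludes only texts so astronomically long that A's counting loop never terminates.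
import Mathlib
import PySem

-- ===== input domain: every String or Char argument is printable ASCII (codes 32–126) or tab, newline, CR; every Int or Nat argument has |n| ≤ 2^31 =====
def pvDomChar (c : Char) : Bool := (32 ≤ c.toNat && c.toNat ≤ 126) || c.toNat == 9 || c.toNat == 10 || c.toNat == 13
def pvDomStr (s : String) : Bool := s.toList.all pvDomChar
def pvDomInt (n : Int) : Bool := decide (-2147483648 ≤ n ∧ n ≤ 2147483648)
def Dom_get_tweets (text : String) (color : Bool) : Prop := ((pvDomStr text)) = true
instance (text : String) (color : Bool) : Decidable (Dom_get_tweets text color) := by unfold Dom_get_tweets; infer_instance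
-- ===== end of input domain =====

-- B counts tweets by solving A's stopping inequality in closed form per digit band (one
-- ceiling division each) and computes every chunk boundary arithmetically instead of
-- tracking a running position (objective: alternative algorithm, same output).

-- ===== PORT A =====
-- len(str(n)) as an Int (shared pure helper of both ports)
def dlen (n : Int) : Int := ((PySem.Int.toStr n).toList.length : Int)

-- the while loop of total_tweets; fuel = len(text)+1 bounds the iteration count
def total_tweets_loop (fuel : Nat) (lenTxt numTweets sumPrefix sumSufix : Int) : Int :=
  match fuel with
  | 0 => numTweets
  | fuel + 1 =>
    if numTweets * 140 - sumPrefix < lenTxt then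
      let numTweets' := numTweets + 1
      let lnt := dlen numTweets'
      let lnta := dlen (numTweets' - 1)
      let prefixLen := 2 * (lnt + 1)
      let sufixLen := 140 - prefixLen
      let diff := (numTweets' - 1) * (lnt - lnta)
      total_tweets_loop fuel lenTxt numTweets'
        (sumPrefix + (prefixLen + diff)) (sumSufix + (sufixLen - diff))
    else numTweets

def total_tweets (text : String) : Int :=
  total_tweets_loop (text.toList.length + 1) (text.toList.length : Int) 0 0 0

def colored_index (i total : Int) : String :=
  "\x1b[94m" ++ "\x1b[1m" ++ PySem.Int.toStr i ++ "/" ++ PySem.Int.toStr total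
    ++ "\x1b[0m" ++ "\x1b[0m"

def get_tweets (text : String) (color : Bool) : List String :=
  let total := total_tweets text
  ((PySem.List.pyRange 1 (total + 1) 1).foldl
    (fun (st : Int × List String) i =>
      let prefixL := dlen i + dlen total + 2
      let posAnt := st.1
      let pos := st.1 + 140 - prefixL
      let chunk := String.ofList (PySem.List.slice text.toList (some posAnt) (some pos))
      (pos, st.2 ++ [if color then colored_index i total ++ " " ++ chunk
                     else PySem.Int.toStr i ++ "/" ++ PySem.Int.toStr total ++ " " ++ chunk]))
    (0, [])).2

-- ===== PORT B =====
-- Source B's _cumdigits: sum of len(str(i)) for i=1..t via digit bands (while p*10 <= t)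
def cumdigits_loop (fuel : Nat) (t s p d : Int) : Int :=
  match fuel with
  | 0 => s + (t - p + 1) * d
  | fuel + 1 =>
    if p * 10 ≤ t then cumdigits_loop fuel t (s + 9 * p * d) (p * 10) (d + 1)
    else s + (t - p + 1) * d

def cumdigits (t : Int) : Int := cumdigits_loop 100 t 0 1 1

-- Source B's _count band loop (while True; fuel bounds the number of digit bands)
def count_loop (fuel : Nat) (n d lo base : Int) : Int :=
  match fuel with
  | 0 => 0
  | fuel + 1 =>
    let hi := 10 * lo - 1
    let slope := 138 - 2 * d
    let need := n + base - (lo - 1) * d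
    let t := -(PySem.Int.floordiv (-need) slope)
    if t ≤ hi then (if lo < t then t else lo)
    else count_loop fuel n (d + 1) (10 * lo) (base + 9 * lo * d)

def total_alt (n : Int) : Int := if n ≤ 0 then 0 else count_loop 100 n 1 1 0

def fmt_alt (color : Bool) (i total : Int) (chunk : String) : String :=
  if color then
    "\x1b[94m\x1b[1m" ++ PySem.Int.toStr i ++ "/" ++ PySem.Int.toStr total
      ++ "\x1b[0m\x1b[0m " ++ chunk
  else PySem.Int.toStr i ++ "/" ++ PySem.Int.toStr total ++ " " ++ chunk

def get_tweets_alt (text : String) (color : Bool) : List String :=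
  let n : Int := (text.toList.length : Int)
  let total := total_alt n
  let body := 138 - dlen total
  (PySem.List.pyRange 1 (total + 1) 1).map (fun i =>
    fmt_alt color i total (String.ofList (PySem.List.slice text.toList
      (some (body * (i - 1) - cumdigits (i - 1))) (some (body * i - cumdigits i)))))

-- ===== PRECONDITION & SPEC =====
-- Pre_ excludes exactly the texts so long that Python A's counting loop never terminates:
-- the loop's capacity sum is maximal at 10^68-1 tweets, where it covers
-- 211111111111111111111111111111111111111111111111111111111111111111041 characters;
-- on any longer text the while condition holds forever and A diverges (returns nothing).
def Pre_get_tweets (text : String) (color : Bool) : Prop :=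
  (text.toList.length : Int) ≤ 211111111111111111111111111111111111111111111111111111111111111111041
instance (text : String) (color : Bool) : Decidable (Pre_get_tweets text color) := by
  unfold Pre_get_tweets; infer_instance

def pvWitness_get_tweets : String × Bool := ("the quick brown fox jumps over the lazy dog", true)

def Spec_get_tweets (text : String) (color : Bool) (out : List String) : Prop := out = get_tweets_alt text color
instance (text : String) (color : Bool) (out : List String) : Decidable (Spec_get_tweets text color out) := by unfold Spec_get_tweets; infer_instance

-- ===== CLAIM (what is proved, stated in full; the proofs are below) =====
def Claim_equal_get_tweets : Prop := ∀ (text : String) (color : Bool), Dom_get_tweets text color → Pre_get_tweets text color → Spec_get_tweets text color (get_tweets text color)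

-- ===== LEMMAS AND PROOFS =====

-- sum of len(str(i)) for i = 1..t (the specification both counting strategies are related to)
def Sd (t : Int) : Int :=
  if h : t ≤ 0 then 0 else Sd (t - 1) + dlen t
termination_by t.toNat
decreasing_by omega

-- per-tweet capacity sum after t tweets: 140*t minus all "i/total " prefixes so far
def fcap (t : Int) : Int := (138 - dlen t) * t - Sd t

theorem Sd_nonpos {t : Int} (h : t ≤ 0) : Sd t = 0 := by rw [Sd]; simp [h]

theorem Sd_pred {t : Int} (h : 1 ≤ t) : Sd t = Sd (t - 1) + dlen t := by
  rw [Sd]; simp [show ¬ t ≤ 0 by omega]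

theorem dlen_eq_toDigits {t : Int} (h : 0 ≤ t) :
    dlen t = ((Nat.toDigits 10 t.toNat).length : Int) := by
  unfold dlen
  rw [PySem.Int.toList_toStr]
  unfold PySem.Int.toChars
  simp [show ¬ t < 0 by omega]

theorem cast_pow_ten (k : Nat) : ((10 ^ k : Nat) : Int) = 10 ^ k := by push_cast; ring

theorem dlen_band (d : Nat) (hd : 0 < d) {t : Int}
    (h1 : (10:Int) ^ (d - 1) ≤ t) (h2 : t < (10:Int) ^ d) : dlen t = (d : Int) := by
  have h0 : 0 ≤ t := le_trans (by positivity) h1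
  rw [dlen_eq_toDigits h0]
  have hcd : t.toNat < 10 ^ d := by have := cast_pow_ten d; omega
  have hcd1 : ¬ (t.toNat < 10 ^ (d - 1)) := by have := cast_pow_ten (d - 1); omega
  have hle : (Nat.toDigits 10 t.toNat).length ≤ d :=
    (Nat.length_toDigits_le_iff (by norm_num) hd).2 hcd
  have hpos : 0 < (Nat.toDigits 10 t.toNat).length := Nat.length_toDigits_pos
  by_cases h1d : d = 1
  · omega
  · have hgt : ¬ ((Nat.toDigits 10 t.toNat).length ≤ d - 1) := by
      intro hco
      exact hcd1 ((Nat.length_toDigits_le_iff (by norm_num) (by omega)).1 hco)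
    omega

theorem dlen_le (d : Nat) (hd : 0 < d) {t : Int} (h0 : 0 ≤ t) (h2 : t < (10:Int) ^ d) :
    dlen t ≤ (d : Int) := by
  rw [dlen_eq_toDigits h0]
  have hcd : t.toNat < 10 ^ d := by have := cast_pow_ten d; omega
  have := (Nat.length_toDigits_le_iff (b := 10) (n := t.toNat) (by norm_num) hd).2 hcd
  omega

theorem dlen_pos {t : Int} (h0 : 0 ≤ t) : 1 ≤ dlen t := by
  rw [dlen_eq_toDigits h0]
  have : 0 < (Nat.toDigits 10 t.toNat).length := Nat.length_toDigits_pos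
  omega

theorem dlen_mono {s t : Int} (h0 : 0 ≤ s) (hst : s ≤ t) : dlen s ≤ dlen t := by
  have h0t : 0 ≤ t := le_trans h0 hst
  have hd : 0 < (Nat.toDigits 10 t.toNat).length := Nat.length_toDigits_pos
  set d := (Nat.toDigits 10 t.toNat).length with hdd
  have htlt : t.toNat < 10 ^ d :=
    (Nat.length_toDigits_le_iff (by norm_num) hd).1 (le_refl d)
  have hslt : s < (10:Int) ^ d := by
    have := cast_pow_ten d; omega
  have := dlen_le d hd h0 hslt
  rw [dlen_eq_toDigits h0t]
  omega

theorem Sd_le {t : Int} (h0 : 0 ≤ t) : Sd t ≤ t * dlen t := by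
  induction t, h0 using Int.le_induction with
  | base => simp [Sd_nonpos]
  | succ n hn ih =>
    rw [Sd_pred (by omega)]
    simp only [add_sub_cancel_right]
    have h2 : dlen n ≤ dlen (n + 1) := dlen_mono hn (by omega)
    nlinarith [dlen_pos (t := n + 1) (by omega)]

theorem sd_band (d : Nat) (hd : 0 < d) {t : Int}
    (h1 : (10:Int) ^ (d - 1) - 1 ≤ t) (h2 : t < (10:Int) ^ d) :
    Sd t = Sd ((10:Int) ^ (d - 1) - 1) + (t - 10 ^ (d - 1) + 1) * d := by
  have hlo : (1:Int) ≤ 10 ^ (d - 1) := one_le_pow₀ (by norm_num)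
  revert h2
  induction t, h1 using Int.le_induction with
  | base => intro h2; ring_nf
  | succ n hn ih =>
    intro h2
    rw [Sd_pred (by omega), add_sub_cancel_right]
    rw [ih (by omega)]
    rw [dlen_band d hd (by omega) h2]
    ring

theorem fcap_band (d : Nat) (hd : 0 < d) {t : Int}
    (h1 : (10:Int) ^ (d - 1) ≤ t) (h2 : t < (10:Int) ^ d) :
    fcap t = (138 - 2 * d) * t - Sd ((10:Int) ^ (d - 1) - 1) + ((10:Int) ^ (d - 1) - 1) * d := by
  unfold fcap
  rw [dlen_band d hd h1 h2, sd_band d hd (by omega) h2]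
  ring

theorem ceil_le_iff {need slope x : Int} (hs : 0 < slope) :
    (-(PySem.Int.floordiv (-need) slope) ≤ x) ↔ need ≤ slope * x := by
  have h1 : (-(PySem.Int.floordiv (-need) slope) ≤ x) ↔ (-x ≤ PySem.Int.floordiv (-need) slope) := by omega
  rw [h1, PySem.Int.le_floordiv_iff_mul_le hs]
  constructor <;> intro h <;> nlinarith

theorem fcap_zero : fcap 0 = 0 := by
  simp [fcap, Sd_nonpos]

-- A's loop returns the least r with fcap r ≥ n, given enough fuel
theorem Aloop_eq (n : Int) : ∀ (fuel : Nat) (t r sp ss : Int),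
    sp = Sd t + t * dlen t + 2 * t → 0 ≤ t → t ≤ r → r - t < (fuel : Int) →
    n ≤ fcap r → (∀ s, t ≤ s → s < r → fcap s < n) →
    total_tweets_loop fuel n t sp ss = r := by
  intro fuel
  induction fuel with
  | zero => intro t r sp ss hsp h0 htr hfuel hr hmin; simp at hfuel; omega
  | succ fuel ih =>
    intro t r sp ss hsp h0 htr hfuel hr hmin
    rw [total_tweets_loop]
    have hcond : t * 140 - sp = fcap t := by
      unfold fcap; rw [hsp]; ring
    by_cases hc : t * 140 - sp < n
    · simp only [if_pos hc]
      have htltr : t < r := by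
        rcases lt_or_eq_of_le htr with h | h
        · exact h
        · exfalso; rw [← h] at hr; omega
      have hstep : Sd (t + 1) = Sd t + dlen (t + 1) := by
        rw [Sd_pred (by omega)]; simp
      apply ih (t + 1) r _ _ _ (by omega) (by omega) (by push_cast at hfuel ⊢; omega) hr
        (fun s hs1 hs2 => hmin s (by omega) hs2)
      simp only [add_sub_cancel_right]
      rw [hsp, hstep]
      ring
    · simp only [if_neg hc]
      by_contra hne
      have : t < r := by omega
      have := hmin t (le_refl t) this
      omega

-- B's band loop returns the same least r
theorem Bloop_eq (n r : Int) (hr : n ≤ fcap r) (hmin : ∀ s, 0 ≤ s → s < r → fcap s < n)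
    (hr1 : 1 ≤ r) (hr68 : r < (10:Int) ^ 68) :
    ∀ (fuel k : Nat), (10:Int) ^ k ≤ r → 68 ≤ k + fuel →
    count_loop fuel n ((k : Int) + 1) ((10:Int) ^ k) (Sd ((10:Int) ^ k - 1)) = r := by
  intro fuel
  induction fuel with
  | zero =>
    intro k hlo hfuel
    exfalso
    have : (10:Int) ^ 68 ≤ 10 ^ k := pow_le_pow_right₀ (by norm_num) (by omega)
    omega
  | succ fuel ih =>
    intro k hlo hfuel
    have hk67 : k ≤ 67 := by
      by_contra hco
      have : (10:Int) ^ 68 ≤ 10 ^ k := pow_le_pow_right₀ (by norm_num) (by omega)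
      omega
    have hslope : (0:Int) < 138 - 2 * ((k:Int) + 1) := by push_cast; omega
    have hband : ∀ x : Int, (10:Int) ^ k ≤ x → x < 10 ^ (k + 1) →
        (n ≤ fcap x ↔ n + Sd ((10:Int) ^ k - 1) - ((10:Int) ^ k - 1) * ((k:Int) + 1)
          ≤ (138 - 2 * ((k:Int) + 1)) * x) := by
      intro x hx1 hx2
      have hb := fcap_band (k + 1) (by omega) (t := x) (by simpa using hx1) (by push_cast at hx2 ⊢; omega)
      simp only [Nat.add_sub_cancel] at hb
      rw [hb]
      push_cast
      constructor <;> intro <;> omega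
    rw [count_loop]
    set need := n + Sd ((10:Int) ^ k - 1) - ((10:Int) ^ k - 1) * ((k:Int) + 1) with hneed
    set t0 := -(PySem.Int.floordiv (-need) (138 - 2 * ((k:Int) + 1))) with ht0
    have hceil : ∀ x : Int, t0 ≤ x ↔ need ≤ (138 - 2 * ((k:Int) + 1)) * x :=
      fun x => ceil_le_iff hslope
    have hlo1 : (1:Int) ≤ 10 ^ k := one_le_pow₀ (by norm_num)
    have hp : (10:Int) * 10 ^ k = 10 ^ (k + 1) := by ring
    by_cases hcase : r < 10 ^ (k + 1)
    · have hrt0 : t0 ≤ r := (hceil r).2 ((hband r hlo hcase).1 hr)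
      have hhi : t0 ≤ 10 * 10 ^ k - 1 := by omega
      rw [if_pos hhi]
      by_cases hlt : (10:Int) ^ k < t0
      · rw [if_pos hlt]
        have hf : n ≤ fcap t0 := (hband t0 (by omega) (by omega)).2 ((hceil t0).1 (le_refl t0))
        by_contra hne
        have := hmin t0 (by omega) (by omega)
        omega
      · rw [if_neg hlt]
        have hf : n ≤ fcap ((10:Int) ^ k) :=
          (hband _ (le_refl _) (by omega)).2 ((hceil _).1 (by omega))
        by_contra hne
        have := hmin ((10:Int) ^ k) (by omega) (by omega)
        omega
    · have ht0hi : ¬ (t0 ≤ 10 * 10 ^ k - 1) := by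
        intro hco
        by_cases hlt : (10:Int) ^ k < t0
        · have hf : n ≤ fcap t0 := (hband t0 (by omega) (by omega)).2 ((hceil t0).1 (le_refl t0))
          have := hmin t0 (by omega) (by omega)
          omega
        · have hf : n ≤ fcap ((10:Int) ^ k) :=
            (hband _ (le_refl _) (by omega)).2 ((hceil _).1 (by omega))
          have := hmin ((10:Int) ^ k) (by omega) (by omega)
          omega
      rw [if_neg ht0hi]
      have hbase : Sd ((10:Int) ^ k - 1) + 9 * 10 ^ k * ((k:Int) + 1) = Sd ((10:Int) ^ (k + 1) - 1) := by
        have hsb := sd_band (k + 1) (by omega) (t := (10:Int) ^ (k + 1) - 1)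
          (by simp only [Nat.add_sub_cancel]; nlinarith) (by omega)
        simp only [Nat.add_sub_cancel] at hsb
        rw [hsb]
        push_cast
        ring
      have hrec := ih (k + 1) (by omega) (by omega)
      push_cast at hrec
      rw [hp, hbase]
      convert hrec using 2


-- Source B's _cumdigits computes Sd
theorem cumdigits_loop_eq : ∀ (fuel k : Nat) (t : Int), 0 ≤ t → t < (10:Int) ^ (k + fuel) →
    ((10:Int) ^ k ≤ t ∨ k = 0) →
    cumdigits_loop fuel t (Sd ((10:Int) ^ k - 1)) ((10:Int) ^ k) ((k : Int) + 1) = Sd t := by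
  intro fuel
  induction fuel with
  | zero =>
    intro k t h0 hlt hor
    rw [cumdigits_loop]
    rcases hor with h | h
    · rw [sd_band (k + 1) (by omega) (t := t) (by simp; omega)
        (by have hm : (10:Int) ^ k ≤ 10 ^ (k + 1) := pow_le_pow_right₀ (by norm_num) (by omega)
            simp only [Nat.add_zero] at hlt; omega)]
      simp only [Nat.add_sub_cancel]
      push_cast
      ring
    · subst h
      simp only [pow_zero] at hlt ⊢
      have ht0 : t = 0 := by omega
      subst ht0
      rw [Sd_nonpos (by norm_num), Sd_nonpos (by norm_num)]
      ring
  | succ fuel ih =>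
    intro k t h0 hlt hor
    rw [cumdigits_loop]
    by_cases hc : (10:Int) ^ k * 10 ≤ t
    · rw [if_pos hc]
      have hbase : Sd ((10:Int) ^ k - 1) + 9 * 10 ^ k * ((k:Int) + 1) = Sd ((10:Int) ^ (k + 1) - 1) := by
        have hlo1 : (1:Int) ≤ 10 ^ k := one_le_pow₀ (by norm_num)
        have hsb := sd_band (k + 1) (by omega) (t := (10:Int) ^ (k + 1) - 1)
          (by simp only [Nat.add_sub_cancel]
              have hm : (10:Int) ^ k ≤ 10 ^ (k + 1) := pow_le_pow_right₀ (by norm_num) (by omega)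
              omega) (by omega)
        simp only [Nat.add_sub_cancel] at hsb
        rw [hsb]
        push_cast
        ring
      have hrec := ih (k + 1) t h0 (by rw [show k + 1 + fuel = k + (fuel + 1) by omega]; exact hlt)
        (Or.inl (by rw [pow_succ]; omega))
      push_cast at hrec
      rw [show (10:Int) ^ k * 10 = 10 ^ (k + 1) by ring, hbase]
      convert hrec using 2
    · rw [if_neg hc]
      rcases hor with h | h
      · rw [sd_band (k + 1) (by omega) (t := t) (by simp; omega) (by rw [pow_succ]; omega)]
        simp only [Nat.add_sub_cancel]
        push_cast
        ring
      · subst h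
        simp only [pow_zero] at hc ⊢
        have hlt9 : t < 10 := by omega
        by_cases ht1 : 1 ≤ t
        · have hsb := sd_band 1 (by omega) (t := t) (by norm_num; omega) (by norm_num; omega)
          rw [hsb]
          norm_num
        · have ht0 : t = 0 := by omega
          subst ht0
          rw [Sd_nonpos (by norm_num), Sd_nonpos (by norm_num)]
          ring


theorem cumdigits_eq {t : Int} (h0 : 0 ≤ t) (h1 : t < (10:Int) ^ 100) : cumdigits t = Sd t := by
  have := cumdigits_loop_eq 100 0 t h0 (by simpa using h1) (Or.inr rfl)
  simpa [cumdigits, Sd_nonpos] using this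

-- closed form of Sd at band tops
def Tc : Nat → Int
  | 0 => 0
  | k + 1 => Tc k + 9 * 10 ^ k * (k + 1)

theorem Sd_pow_sub_one : ∀ k : Nat, Sd ((10:Int) ^ k - 1) = Tc k := by
  intro k
  induction k with
  | zero => simp [Sd_nonpos, Tc]
  | succ k ih =>
    have h1 : (10:Int) ^ (k + 1 - 1) - 1 ≤ (10:Int) ^ (k + 1) - 1 := by
      simp only [Nat.add_sub_cancel]
      have : (10:Int) ^ k ≤ 10 ^ (k + 1) := by
        apply pow_le_pow_right₀ (by norm_num); omega
      omega
    have h2 : (10:Int) ^ (k + 1) - 1 < (10:Int) ^ (k + 1) := by omega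
    rw [sd_band (k + 1) (by omega) h1 h2]
    simp only [Nat.add_sub_cancel]
    rw [ih, Tc]
    push_cast
    ring

theorem fcap_top : fcap ((10:Int) ^ 68 - 1)
    = 211111111111111111111111111111111111111111111111111111111111111111041 := by
  have h1 : (10:Int) ^ (68 - 1) ≤ (10:Int) ^ 68 - 1 := by norm_num
  have h2 : (10:Int) ^ 68 - 1 < (10:Int) ^ 68 := by norm_num
  unfold fcap
  rw [dlen_band 68 (by norm_num) h1 h2, sd_band 68 (by norm_num) (by omega) h2,
    Sd_pow_sub_one]
  norm_num [Tc]

theorem fcap_ge_self {n : Int} (hn : 1 ≤ n) (h : n < (10:Int) ^ 68) : n ≤ fcap n := by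
  have hd : dlen n ≤ 68 := dlen_le 68 (by norm_num) (by omega) h
  have hs : Sd n ≤ n * dlen n := Sd_le (by omega)
  unfold fcap
  nlinarith [dlen_pos (t := n) (by omega)]

theorem fmt_eq (color : Bool) (i t : Int) (chunk : String) :
    (if color then colored_index i t ++ " " ++ chunk
     else PySem.Int.toStr i ++ "/" ++ PySem.Int.toStr t ++ " " ++ chunk)
      = fmt_alt color i t chunk := by
  cases color <;> simp [colored_index, fmt_alt, String.append_assoc]

-- A's slicing fold produces B's closed-form map
theorem fold_build (textL : List Char) (color : Bool) (total : Int) :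
    ∀ (k : Nat) (a : Int) (acc : List String), 1 ≤ a → (total + 1 - a).toNat = k →
    ((PySem.List.pyRange a (total + 1) 1).foldl
      (fun (st : Int × List String) i =>
        let prefixL := dlen i + dlen total + 2
        let posAnt := st.1
        let pos := st.1 + 140 - prefixL
        let chunk := String.ofList (PySem.List.slice textL (some posAnt) (some pos))
        (pos, st.2 ++ [if color then colored_index i total ++ " " ++ chunk
                       else PySem.Int.toStr i ++ "/" ++ PySem.Int.toStr total ++ " " ++ chunk]))
      ((138 - dlen total) * (a - 1) - Sd (a - 1), acc)).2
    = acc ++ (PySem.List.pyRange a (total + 1) 1).map (fun i =>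
        fmt_alt color i total (String.ofList (PySem.List.slice textL
          (some ((138 - dlen total) * (i - 1) - Sd (i - 1)))
          (some ((138 - dlen total) * i - Sd i))))) := by
  intro k
  induction k with
  | zero =>
    intro a acc ha hk
    have hab : total + 1 ≤ a := by omega
    rw [PySem.List.pyRange_one_eq_nil hab]
    simp
  | succ k ih =>
    intro a acc ha hk
    have hab : a < total + 1 := by omega
    rw [PySem.List.pyRange_one_cons hab]
    simp only [List.foldl_cons, List.map_cons]
    have hpos : (138 - dlen total) * (a - 1) - Sd (a - 1) + 140 - (dlen a + dlen total + 2)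
        = (138 - dlen total) * a - Sd a := by
      rw [Sd_pred ha]
      ring
    rw [fmt_eq, hpos]
    have := ih (a + 1) (acc ++ [fmt_alt color a total (String.ofList (PySem.List.slice textL
          (some ((138 - dlen total) * (a - 1) - Sd (a - 1)))
          (some ((138 - dlen total) * a - Sd a))))]) (by omega) (by omega)
    simp only [add_sub_cancel_right] at this
    simp only [List.append_assoc, List.singleton_append] at this ⊢
    exact this

theorem cast_M : (((10:Nat) ^ 68 - 1 : Nat) : Int) = (10:Int) ^ 68 - 1 := by
  have h1 : (1:Nat) ≤ 10 ^ 68 := Nat.one_le_iff_ne_zero.mpr (by positivity)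
  push_cast [Nat.cast_sub h1]

theorem totals_eq (text : String)
    (hpre : (text.toList.length : Int) ≤ 211111111111111111111111111111111111111111111111111111111111111111041) :
    total_tweets text = total_alt (text.toList.length : Int) ∧
    0 ≤ total_alt (text.toList.length : Int) ∧
    total_alt (text.toList.length : Int) < (10:Int) ^ 68 := by
  set n : Int := (text.toList.length : Int) with hn
  have hn0 : 0 ≤ n := by positivity
  by_cases hz : n ≤ 0
  · have hB : total_alt n = 0 := by unfold total_alt; rw [if_pos hz]
    have hA : total_tweets text = 0 := by
      unfold total_tweets
      have hlen : text.toList.length = 0 := by omega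
      rw [hlen]
      rw [total_tweets_loop]
      have : ¬ ((0:Int) * 140 - 0 < (0:Int)) := by norm_num
      simp only at this ⊢
      norm_num
    rw [hA, hB]
    norm_num
  · push_neg at hz
    have hz1 : 1 ≤ n := hz
    have hwitc : n ≤ fcap (((10:Nat) ^ 68 - 1 : Nat) : Int) := by
      rw [cast_M, fcap_top]; exact hpre
    have hexN : ∃ m : Nat, n ≤ fcap (m : Int) := ⟨(10:Nat) ^ 68 - 1, hwitc⟩
    set r : Int := ((Nat.find hexN : Nat) : Int) with hrdef
    have hrspec : n ≤ fcap r := Nat.find_spec hexN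
    have hmin : ∀ s : Int, 0 ≤ s → s < r → fcap s < n := by
      intro s h0 hs
      by_contra hc
      push_neg at hc
      have hps : n ≤ fcap ((s.toNat : Nat) : Int) := by
        rwa [show ((s.toNat : Nat) : Int) = s from by omega]
      have := Nat.find_min' hexN hps
      omega
    have hfind68 : Nat.find hexN ≤ (10:Nat) ^ 68 - 1 := Nat.find_min' hexN hwitc
    have hr68 : r < (10:Int) ^ 68 := by
      have h2 : r ≤ (((10:Nat) ^ 68 - 1 : Nat) : Int) := by
        rw [hrdef]; exact_mod_cast hfind68
      rw [cast_M] at h2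
      linarith
    have hr0 : 0 ≤ r := by positivity
    have hr1 : 1 ≤ r := by
      rcases eq_or_lt_of_le hr0 with h | h
      · exfalso; rw [← h] at hrspec; rw [fcap_zero] at hrspec; omega
      · omega
    have hrn : r ≤ n := by
      by_cases hc : n < (10:Int) ^ 68
      · by_contra hcon
        push_neg at hcon
        have := hmin n hn0 hcon
        have := fcap_ge_self hz1 hc
        omega
      · push_neg at hc
        linarith
    have hA : total_tweets text = r := by
      unfold total_tweets
      rw [← hn]
      apply Aloop_eq n (text.toList.length + 1) 0 r 0 0 (by simp [Sd_nonpos]) (le_refl 0)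
        hr0 (by push_cast; omega) hrspec (fun s hs1 hs2 => hmin s hs1 hs2)
    have hB : total_alt n = r := by
      unfold total_alt
      rw [if_neg (by omega)]
      have := Bloop_eq n r hrspec hmin hr1 hr68 100 0 (by simpa using hr1) (by omega)
      simp only [pow_zero, Nat.cast_zero, zero_add] at this
      rw [show Sd ((1:Int) - 1) = 0 from Sd_nonpos (by norm_num)] at this
      exact this
    rw [hA, hB]
    exact ⟨rfl, hr0, hr68⟩

theorem main_eq (text : String) (color : Bool)
    (hpre : (text.toList.length : Int) ≤ 211111111111111111111111111111111111111111111111111111111111111111041) :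
    get_tweets text color = get_tweets_alt text color := by
  obtain ⟨hT, hT0, hT68⟩ := totals_eq text hpre
  set n : Int := (text.toList.length : Int) with hn
  set T : Int := total_alt n with hTdef
  have hinit : (0:Int) = (138 - dlen T) * (1 - 1) - Sd (1 - 1) := by
    rw [show ((1:Int) - 1) = 0 from by norm_num, Sd_nonpos (le_refl 0)]
    ring
  have hcum : ∀ t : Int, 0 ≤ t → t ≤ T → cumdigits t = Sd t := by
    intro t h0 hle
    apply cumdigits_eq h0
    have : (10:Int) ^ 68 ≤ 10 ^ 100 := pow_le_pow_right₀ (by norm_num) (by omega)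
    omega
  simp only [get_tweets, get_tweets_alt, ← hn, hT, ← hTdef]
  rw [show ((0:Int), ([] : List String)) = ((138 - dlen T) * (1 - 1) - Sd (1 - 1), ([] : List String)) from by rw [← hinit]]
  rw [fold_build text.toList color T T.toNat 1 [] (le_refl 1) (by omega)]
  simp only [List.nil_append]
  apply List.map_congr_left
  intro i hi
  rw [PySem.List.mem_pyRange_one] at hi
  rw [hcum (i - 1) (by omega) (by omega), hcum i (by omega) (by omega)]

-- ===== VERDICT (by name: the statement is the Claim_ definition above) =====
theorem get_tweets_spec : Claim_equal_get_tweets := by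
  intro text color _ hpre
  unfold Spec_get_tweets
  exact main_eq text color hpre
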